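-- pv_equiv track=rewrite | github.com/prekshaupatel/Bioinformatics_Projects | predicting_promoter_activity/src/feature.py | rightWeightedACGT
-- ===== SOURCE A (Python) =====
-- def rightWeightedACGT(line,n,complete_list):
--     comp = complete_list
--     i = 0
--     stop = len(line)+1-n
--     temp = {}
--     for a in comp:
--         i = 0
--         total = 0
--         while i < stop:
--             if line[i:i+n] == a:
--                 begin = i+1
--                 j = 1
--                 while i+n < stop:
--                     i = i+n
--                     if line[i:i+n] != a:
--                         break
--                     j = j+1
--                 total = total + j*(begin)
--             i = i+1
--         temp[a] = (total)*n
--     #could change temp[a] = log(total+1),total*len(a)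
--     return temp
-- ===== SOURCE B (Python) =====
-- def rightWeightedACGT(line, n, complete_list):
--     stop = len(line) + 1 - n
--     # one pass: index every n-gram window by its list of start positions (ascending)
--     index = {}
--     for i in range(stop):
--         index.setdefault(line[i:i+n], []).append(i)
--     result = {}
--     for a in complete_list:
--         positions = index.get(a, [])
--         pos_set = set(positions)
--         total = 0
--         c = 0
--         for p in positions:
--             if p < c:
--                 continue
--             j = 1
--             k = p
--             while k + n < stop and (k + n) in pos_set:
--                 k += n
--                 j += 1
--             c = (k + n + 1) if (k + n < stop) else (k + 1)
--             total += j * (p + 1)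
--         result[a] = total * n
--     return result
-- ===== Notes on version B (the rewrite author's own statement) =====
-- stated objective: faster
-- what changed: Instead of re-scanning the whole line once per pattern, B builds a single n-gram position index in one pass and replays the run-weighting logic only over each pattern's own (sorted) occurrence positions, using set membership for the aligned-run walk.
-- outside the precondition, e.g. on rightWeightedACGT('ab', 0, ['x']): A returns {'x': 0}, B returns {'x': 0}
import Mathlib
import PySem

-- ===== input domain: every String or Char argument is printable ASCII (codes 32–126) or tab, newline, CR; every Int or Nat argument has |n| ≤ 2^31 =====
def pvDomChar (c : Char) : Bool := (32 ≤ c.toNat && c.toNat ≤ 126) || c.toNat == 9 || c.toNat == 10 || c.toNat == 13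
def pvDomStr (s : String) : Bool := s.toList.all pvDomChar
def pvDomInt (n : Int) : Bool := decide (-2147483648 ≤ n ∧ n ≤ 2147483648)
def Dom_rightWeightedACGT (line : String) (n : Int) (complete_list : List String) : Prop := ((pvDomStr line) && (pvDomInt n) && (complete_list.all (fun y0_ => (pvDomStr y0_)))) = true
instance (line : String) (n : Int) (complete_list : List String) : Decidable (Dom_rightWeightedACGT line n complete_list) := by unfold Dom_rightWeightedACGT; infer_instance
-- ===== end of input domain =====

-- B replaces A's per-pattern rescans of the whole line by one n-gram position index built in a single
-- pass, replaying the run-weighting walk only over each pattern's own occurrence positions (objective: faster).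

-- ===== PORT A =====
-- line[i:i+n] (shared slice helper: both Pythons compute this very expression)
def pvKey (lineL : List Char) (n i : Int) : List Char :=
  PySem.List.slice lineL (some i) (some (i + n))

-- A's inner 'while i+n < stop: i += n; if line[i:i+n] != a: break; j += 1', returning the final (i, j).
-- Fuel is an artifact of totality; lineL.length + 1 provably suffices under Pre_ (1 ≤ n).
def pvAInner (lineL aL : List Char) (n stop : Int) : Nat → Int → Int → Int × Int
  | 0, i, j => (i, j)
  | f + 1, i, j =>
    if i + n < stop then
      if pvKey lineL n (i + n) ≠ aL then (i + n, j)
      else pvAInner lineL aL n stop f (i + n) (j + 1)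
    else (i, j)

-- A's outer 'while i < stop' scan for one pattern a, returning total.
def pvAOuter (lineL aL : List Char) (n stop : Int) : Nat → Int → Int → Int
  | 0, _, total => total
  | f + 1, i, total =>
    if i < stop then
      if pvKey lineL n i = aL then
        let r := pvAInner lineL aL n stop (lineL.length + 1) i 1
        pvAOuter lineL aL n stop f (r.1 + 1) (total + r.2 * (i + 1))
      else pvAOuter lineL aL n stop f (i + 1) total
    else total

def rightWeightedACGT (line : String) (n : Int) (complete_list : List String) : List (String × Int) :=
  let lineL := line.toList
  let stop : Int := (lineL.length : Int) + 1 - n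
  (complete_list.foldl
    (fun d a => d.insert a (pvAOuter lineL a.toList n stop (stop.toNat + 1) 0 0 * n))
    (PySem.Dict.empty : PySem.Dict String Int)).items

-- ===== PORT B =====
-- B's 'while k+n < stop and (k+n) in pos_set: k += n; j += 1' (fuel as above).
def pvBWalk (posSet : PySem.Set Int) (n stop : Int) : Nat → Int → Int → Int × Int
  | 0, k, j => (k, j)
  | f + 1, k, j =>
    if k + n < stop ∧ PySem.Set.contains posSet (k + n) = true then
      pvBWalk posSet n stop f (k + n) (j + 1)
    else (k, j)

-- B's 'for p in positions' loop with cursor c and accumulator total.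
def pvBProcess (posSet : PySem.Set Int) (n stop : Int) (wf : Nat) :
    List Int → Int → Int → Int
  | [], _, total => total
  | p :: rest, c, total =>
    if p < c then pvBProcess posSet n stop wf rest c total
    else
      let r := pvBWalk posSet n stop wf p 1
      let c' := if r.1 + n < stop then r.1 + n + 1 else r.1 + 1
      pvBProcess posSet n stop wf rest c' (total + r.2 * (p + 1))

def rightWeightedACGT_alt (line : String) (n : Int) (complete_list : List String) : List (String × Int) :=
  let lineL := line.toList
  let stop : Int := (lineL.length : Int) + 1 - n
  let index : PySem.Dict (List Char) (List Int) :=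
    (PySem.List.pyRange 0 stop 1).foldl
      (fun d i => d.modify (pvKey lineL n i) [] (· ++ [i])) PySem.Dict.empty
  (complete_list.foldl
    (fun d a =>
      let positions := index.getD a.toList []
      let posSet := PySem.Set.ofList positions
      d.insert a (pvBProcess posSet n stop (lineL.length + 1) positions 0 0 * n))
    (PySem.Dict.empty : PySem.Dict String Int)).items

-- ===== PRECONDITION & SPEC =====
-- Pre_ excludes n ≤ 0, outside the n-gram domain: there A's inner loop advances i by n ≤ 0 and diverges
-- as soon as any pattern equals one of the degenerate windows, and on the remaining n ≤ 0 inputs A only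
-- returns trivial zero totals (e.g. A("ab", 0, ["x"]) = {"x": 0}, which B returns as well).
def Pre_rightWeightedACGT (line : String) (n : Int) (complete_list : List String) : Prop := 1 ≤ n
instance (line : String) (n : Int) (complete_list : List String) : Decidable (Pre_rightWeightedACGT line n complete_list) := by unfold Pre_rightWeightedACGT; infer_instance

def pvWitness_rightWeightedACGT : String × Int × List String := ("ACGTAC", 2, ["AC", "GT", "TT"])

def Spec_rightWeightedACGT (line : String) (n : Int) (complete_list : List String) (out : List (String × Int)) : Prop := out = rightWeightedACGT_alt line n complete_list
instance (line : String) (n : Int) (complete_list : List String) (out : List (String × Int)) : Decidable (Spec_rightWeightedACGT line n complete_list out) := by unfold Spec_rightWeightedACGT; infer_instance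

-- ===== CLAIM (what is proved, stated in full; the proofs are below) =====
def Claim_equal_rightWeightedACGT : Prop := ∀ (line : String) (n : Int) (complete_list : List String), Dom_rightWeightedACGT line n complete_list → Pre_rightWeightedACGT line n complete_list → Spec_rightWeightedACGT line n complete_list (rightWeightedACGT line n complete_list)

-- ===== LEMMAS AND PROOFS =====

-- occurrence positions of pattern aL among the windows of lineL
def pvS (lineL aL : List Char) (n stop : Int) : List Int :=
  (PySem.List.pyRange 0 stop 1).filter (fun i => pvKey lineL n i == aL)

theorem pvS_mem (lineL aL : List Char) (n stop : Int) (x : Int) :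
    x ∈ pvS lineL aL n stop ↔ 0 ≤ x ∧ x < stop ∧ pvKey lineL n x = aL := by
  simp [pvS, List.mem_filter, PySem.List.mem_pyRange_one, and_assoc]

theorem pvS_sorted (lineL aL : List Char) (n stop : Int) :
    (pvS lineL aL n stop).Pairwise (· < ·) :=
  (PySem.List.pairwise_lt_pyRange_one 0 stop).filter _

-- the index B builds answers exactly with pvS
theorem pvIndex_getD (lineL aL : List Char) (n stop : Int) :
    ((PySem.List.pyRange 0 stop 1).foldl
      (fun d i => d.modify (pvKey lineL n i) [] (· ++ [i]))
      (PySem.Dict.empty : PySem.Dict (List Char) (List Int))).getD aL []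
      = pvS lineL aL n stop := by
  have h := PySem.Dict.getD_foldl_modify_append
    ((PySem.List.pyRange 0 stop 1).map (fun i => (pvKey lineL n i, i)))
    (PySem.Dict.empty : PySem.Dict (List Char) (List Int)) aL
  rw [List.foldl_map] at h
  simp only [h, PySem.Dict.getD_empty, List.nil_append, List.filter_map, List.map_map]
  simp [pvS, Function.comp_def]
-- walk correspondence: A's inner loop result from B's walk result
theorem pvWalk_eq (lineL aL : List Char) (n stop : Int) (posSet : PySem.Set Int)
    (h1 : 1 ≤ n)
    (hmem : ∀ x : Int, 0 ≤ x → x < stop →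
      (PySem.Set.contains posSet x = true ↔ pvKey lineL n x = aL)) :
    ∀ (f : Nat) (k j : Int), 0 ≤ k → (stop - k).toNat < f →
      pvAInner lineL aL n stop f k j =
        (((if (pvBWalk posSet n stop f k j).1 + n < stop
            then (pvBWalk posSet n stop f k j).1 + n
            else (pvBWalk posSet n stop f k j).1)),
          (pvBWalk posSet n stop f k j).2) := by
  intro f
  induction f with
  | zero => intro k j hk hf; omega
  | succ f ih =>
    intro k j hk hf
    by_cases hc : k + n < stop
    · by_cases hkey : pvKey lineL n (k + n) = aL
      · have hm : PySem.Set.contains posSet (k + n) = true :=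
          (hmem (k + n) (by omega) hc).mpr hkey
        rw [show pvAInner lineL aL n stop (f + 1) k j
              = pvAInner lineL aL n stop f (k + n) (j + 1) from by
            simp [pvAInner, hc, hkey]]
        rw [show pvBWalk posSet n stop (f + 1) k j
              = pvBWalk posSet n stop f (k + n) (j + 1) from by
            simp only [pvBWalk, if_pos (And.intro hc hm)]]
        exact ih _ _ (by omega) (by omega)
      · have hm : ¬ PySem.Set.contains posSet (k + n) = true :=
          fun h => hkey ((hmem (k + n) (by omega) hc).mp h)
        rw [show pvAInner lineL aL n stop (f + 1) k j = (k + n, j) from by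
            simp [pvAInner, hc, hkey]]
        rw [show pvBWalk posSet n stop (f + 1) k j = (k, j) from by
            simp only [pvBWalk, if_neg (fun h : _ ∧ _ => hm h.2)]]
        simp [hc]
    · rw [show pvAInner lineL aL n stop (f + 1) k j = (k, j) from by
          simp [pvAInner, hc]]
      rw [show pvBWalk posSet n stop (f + 1) k j = (k, j) from by
          simp only [pvBWalk, if_neg (fun h : _ ∧ _ => hc h.1)]]
      simp [hc]
theorem pvWalk_ge (posSet : PySem.Set Int) (n stop : Int) (h1 : 1 ≤ n) :
    ∀ (f : Nat) (k j : Int), k ≤ (pvBWalk posSet n stop f k j).1 := by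
  intro f
  induction f with
  | zero => intro k j; simp [pvBWalk]
  | succ f ih =>
    intro k j
    simp only [pvBWalk]
    split
    · exact le_trans (by omega) (ih (k + n) (j + 1))
    · simp
theorem pvBProcess_all_lt (posSet : PySem.Set Int) (n stop : Int) (wf : Nat) :
    ∀ (ps : List Int) (c t : Int), (∀ p ∈ ps, p < c) →
      pvBProcess posSet n stop wf ps c t = t := by
  intro ps
  induction ps with
  | nil => intro c t _; rfl
  | cons p rest ih =>
    intro c t h
    have hp : p < c := h p (by simp)
    simp only [pvBProcess, if_pos hp]
    exact ih c t (fun q hq => h q (by simp [hq]))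
theorem pvBProcess_append (posSet : PySem.Set Int) (n stop : Int) (wf : Nat) :
    ∀ (ps1 ps2 : List Int) (c t : Int), (∀ p ∈ ps1, p < c) →
      pvBProcess posSet n stop wf (ps1 ++ ps2) c t = pvBProcess posSet n stop wf ps2 c t := by
  intro ps1
  induction ps1 with
  | nil => intro ps2 c t _; rfl
  | cons p rest ih =>
    intro ps2 c t h
    have hp : p < c := h p (by simp)
    simp only [List.cons_append, pvBProcess, if_pos hp]
    exact ih ps2 c t (fun q hq => h q (by simp [hq]))
theorem pvBProcess_cursor_succ (posSet : PySem.Set Int) (n stop : Int) (wf : Nat) :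
    ∀ (ps : List Int) (c t : Int), (∀ p ∈ ps, p ≠ c) →
      pvBProcess posSet n stop wf ps c t = pvBProcess posSet n stop wf ps (c + 1) t := by
  intro ps
  induction ps with
  | nil => intro c t _; rfl
  | cons p rest ih =>
    intro c t h
    have hp : p ≠ c := h p (by simp)
    by_cases hlt : p < c
    · simp only [pvBProcess, if_pos hlt, if_pos (by omega : p < c + 1)]
      exact ih c t (fun q hq => h q (by simp [hq]))
    · simp only [pvBProcess, if_neg hlt, if_neg (by omega : ¬ p < c + 1)]
-- main loop correspondence for one pattern
theorem pvOuter_eq (lineL aL : List Char) (n stop : Int) (posSet : PySem.Set Int)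
    (h1 : 1 ≤ n) (hlen : stop ≤ (lineL.length : Int))
    (hmem : ∀ x : Int, 0 ≤ x → x < stop →
      (PySem.Set.contains posSet x = true ↔ pvKey lineL n x = aL)) :
    ∀ (f : Nat) (ps pre : List Int) (c total : Int), 0 ≤ c → (stop - c).toNat < f →
      pvS lineL aL n stop = pre ++ ps → (∀ p ∈ pre, p < c) →
      pvAOuter lineL aL n stop f c total
        = pvBProcess posSet n stop (lineL.length + 1) ps c total := by
  intro f
  induction f with
  | zero => intro ps pre c total hc hf; omega
  | succ f ih =>
    intro ps pre c total hc hf hsplit hpre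
    by_cases hcs : c < stop
    · by_cases hkey : pvKey lineL n c = aL
      · -- c is an occurrence: it heads the not-yet-skipped part of ps
        have hcS : c ∈ pvS lineL aL n stop := (pvS_mem lineL aL n stop c).mpr ⟨hc, hcs, hkey⟩
        have hcps : c ∈ ps := by
          rcases List.mem_append.mp (hsplit ▸ hcS) with h | h
          · exact absurd (hpre c h) (lt_irrefl c)
          · exact h
        obtain ⟨ps1, ps2, hps⟩ := List.append_of_mem hcps
        have hsort : (pvS lineL aL n stop).Pairwise (· < ·) := pvS_sorted lineL aL n stop
        rw [hsplit, hps, List.pairwise_append] at hsort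
        have hsort2 := hsort.2.1
        rw [List.pairwise_append] at hsort2
        have hps1 : ∀ p ∈ ps1, p < c := fun p hp => hsort2.2.2 p hp c (by simp)
        -- B side: skip ps1 and run at c
        set w := pvBWalk posSet n stop (lineL.length + 1) c 1 with hw
        have hwge : c ≤ w.1 := pvWalk_ge posSet n stop h1 (lineL.length + 1) c 1
        set c' : Int := if w.1 + n < stop then w.1 + n + 1 else w.1 + 1 with hc'
        have hc'ge : c + 1 ≤ c' := by rw [hc']; split <;> omega
        have hB : pvBProcess posSet n stop (lineL.length + 1) ps c total
            = pvBProcess posSet n stop (lineL.length + 1) ps2 c' (total + w.2 * (c + 1)) := by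
          rw [hps, pvBProcess_append posSet n stop (lineL.length + 1) ps1 (c :: ps2) c total hps1]
          simp only [pvBProcess, if_neg (lt_irrefl c), ← hw, ← hc']
        -- A side: run the inner loop at c
        have hW := pvWalk_eq lineL aL n stop posSet h1 hmem (lineL.length + 1) c 1 hc
          (by omega)
        have hA : pvAOuter lineL aL n stop (f + 1) c total
            = pvAOuter lineL aL n stop f c' (total + w.2 * (c + 1)) := by
          simp only [pvAOuter, if_pos hcs, if_pos hkey, hW, ← hw]
          have : (if w.1 + n < stop then w.1 + n else w.1, w.2).1 + 1 = c' := by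
            rw [hc']; split <;> omega
          rw [this]
        rw [hA, hB]
        exact ih ps2 (pre ++ ps1 ++ [c]) c' (total + w.2 * (c + 1)) (by omega) (by omega)
          (by rw [hsplit, hps]; simp)
          (by
            intro p hp
            simp only [List.append_assoc, List.mem_append, List.mem_singleton] at hp
            rcases hp with h | h | h
            · exact lt_of_lt_of_le (hpre p h) (by omega)
            · exact lt_of_lt_of_le (hps1 p h) (by omega)
            · omega)
      · -- no occurrence at c: A steps to c+1, B's list has no element equal to c
        have hne : ∀ p ∈ ps, p ≠ c := by
          intro p hp hpc
          subst hpc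
          exact hkey ((pvS_mem lineL aL n stop p).mp
            (hsplit ▸ List.mem_append.mpr (Or.inr hp))).2.2
        rw [pvBProcess_cursor_succ posSet n stop (lineL.length + 1) ps c total hne]
        rw [show pvAOuter lineL aL n stop (f + 1) c total
              = pvAOuter lineL aL n stop f (c + 1) total from by
            simp [pvAOuter, hcs, hkey]]
        exact ih ps pre (c + 1) total (by omega) (by omega) hsplit
          (fun p hp => lt_trans (hpre p hp) (by omega))
    · -- past the end: A returns, B skips everything
      rw [show pvAOuter lineL aL n stop (f + 1) c total = total from by
          simp [pvAOuter, hcs]]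
      refine (pvBProcess_all_lt posSet n stop (lineL.length + 1) ps c total ?_).symm
      intro p hp
      have := (pvS_mem lineL aL n stop p).mp (hsplit ▸ List.mem_append.mpr (Or.inr hp))
      omega

-- per-pattern value equality at the ports' actual call sites
theorem pvValue_eq (lineL aL : List Char) (n : Int) (h1 : 1 ≤ n) :
    pvAOuter lineL aL n ((lineL.length : Int) + 1 - n)
        (((lineL.length : Int) + 1 - n).toNat + 1) 0 0
      = pvBProcess
          (PySem.Set.ofList
            (((PySem.List.pyRange 0 ((lineL.length : Int) + 1 - n) 1).foldl
              (fun d i => d.modify (pvKey lineL n i) [] (· ++ [i]))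
              (PySem.Dict.empty : PySem.Dict (List Char) (List Int))).getD aL []))
          n ((lineL.length : Int) + 1 - n) (lineL.length + 1)
          (((PySem.List.pyRange 0 ((lineL.length : Int) + 1 - n) 1).foldl
              (fun d i => d.modify (pvKey lineL n i) [] (· ++ [i]))
              (PySem.Dict.empty : PySem.Dict (List Char) (List Int))).getD aL [])
          0 0 := by
  set stop : Int := (lineL.length : Int) + 1 - n with hstop
  rw [pvIndex_getD lineL aL n stop]
  refine pvOuter_eq lineL aL n stop (PySem.Set.ofList (pvS lineL aL n stop)) h1 (by omega)
    ?_ (stop.toNat + 1) (pvS lineL aL n stop) [] 0 0 le_rfl (by omega) (by simp)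
    (by simp)
  intro x hx hxs
  rw [show PySem.Set.contains (PySem.Set.ofList (pvS lineL aL n stop)) x = true
        ↔ x ∈ PySem.Set.ofList (pvS lineL aL n stop) from List.contains_iff_mem]
  rw [PySem.Set.mem_ofList, pvS_mem]
  constructor
  · exact fun h => h.2.2
  · exact fun h => ⟨hx, hxs, h⟩

-- ===== VERDICT (by name: the statement is the Claim_ definition above) =====
theorem rightWeightedACGT_spec : Claim_equal_rightWeightedACGT := by
  intro line n complete_list _ hpre
  have h1 : (1 : Int) ≤ n := hpre
  unfold Spec_rightWeightedACGT
  simp only [rightWeightedACGT, rightWeightedACGT_alt]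
  congr 1
  refine PySem.List.foldl_congr_mem complete_list _ _ _ ?_
  intro d a _
  rw [pvValue_eq line.toList a.toList n h1]
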